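-- pv_equiv track=rewrite | github.com/mbarkhau/bumpver | src/pycalver/v2version.py | _clear_zero_segments
-- ===== SOURCE A (Python) =====
-- import typing as typ
--
-- def _clear_zero_segments(
--     formatted_segs: typ.List[str], is_zero_segment: typ.List[bool]
-- ) -> typ.List[str]:
--     non_zero_segs = list(formatted_segs)
--
--     has_val_to_right = False
--     for idx, is_zero in reversed(list(enumerate(is_zero_segment))):
--         is_optional = 0 < idx < len(formatted_segs) - 1
--         if is_optional:
--             if is_zero and not has_val_to_right:
--                 non_zero_segs[idx] = ""
--             else:
--                 has_val_to_right = True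
--
--     return non_zero_segs
-- ===== SOURCE B (Python) =====
-- import typing as typ
--
-- def _clear_zero_segments(
--     formatted_segs: typ.List[str], is_zero_segment: typ.List[bool]
-- ) -> typ.List[str]:
--     n = len(formatted_segs)
--     last_nonzero = -1
--     for idx in range(len(is_zero_segment)):
--         if 0 < idx < n - 1 and not is_zero_segment[idx]:
--             last_nonzero = idx
--     return [
--         "" if (0 < idx < n - 1 and idx < len(is_zero_segment)
--                and is_zero_segment[idx] and idx > last_nonzero) else seg
--         for idx, seg in enumerate(formatted_segs)
--     ]
-- ===== Notes on version B (the rewrite author's own statement) =====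
-- stated objective: alternative
-- what changed: Replaces the reverse scan with a running has_val_to_right flag that mutates a copy in place by a forward pass computing the last non-zero optional index, followed by a list comprehension that blanks exactly the zero optional segments to the right of it.
import Mathlib
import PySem

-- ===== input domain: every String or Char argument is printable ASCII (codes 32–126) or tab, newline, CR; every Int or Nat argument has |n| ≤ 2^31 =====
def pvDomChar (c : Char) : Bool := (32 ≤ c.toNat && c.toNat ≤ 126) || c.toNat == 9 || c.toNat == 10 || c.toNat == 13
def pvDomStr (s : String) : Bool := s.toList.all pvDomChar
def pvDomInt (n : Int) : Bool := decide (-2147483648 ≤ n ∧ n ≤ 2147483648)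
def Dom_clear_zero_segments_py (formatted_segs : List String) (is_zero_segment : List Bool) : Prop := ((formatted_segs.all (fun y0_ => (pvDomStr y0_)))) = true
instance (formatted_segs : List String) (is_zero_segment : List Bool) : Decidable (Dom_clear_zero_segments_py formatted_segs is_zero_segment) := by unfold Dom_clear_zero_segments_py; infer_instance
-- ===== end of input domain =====

-- B replaces A's reverse scan carrying a running has_val_to_right flag and mutating a copy in
-- place by a forward pass that computes the last non-zero optional index, followed by a
-- clearing list comprehension (alternative decomposition, same O(n) cost).

-- ===== PORT A =====
-- loop body of A's 'for idx, is_zero in reversed(list(enumerate(is_zero_segment)))'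
def stepA (nfs : Nat) (st : Bool × List String) (p : Int × Bool) : Bool × List String :=
  if 0 < p.1 ∧ p.1 < (nfs : Int) - 1 then      -- is_optional
    if p.2 = true ∧ st.1 = false then (st.1, PySem.List.pySetD st.2 p.1 "")
    else (true, st.2)
  else st

def clear_zero_segments_py (formatted_segs : List String) (is_zero_segment : List Bool) : List String :=
  (((PySem.List.enumerate is_zero_segment 0).reverse).foldl
      (stepA formatted_segs.length) (false, formatted_segs)).2

-- ===== PORT B =====
-- B's first pass: the last_nonzero accumulator loop over range(len(is_zero_segment))
def lastNZfold (n : Int) (izs : List Bool) (m : Nat) : Int :=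
  (PySem.List.pyRange 0 (m : Int) 1).foldl
    (fun acc idx =>
      if 0 < idx ∧ idx < n - 1 ∧ PySem.List.pyGetD izs idx false = false then idx else acc)
    (-1)

def clear_zero_segments_py_alt (formatted_segs : List String) (is_zero_segment : List Bool) : List String :=
  let n : Int := formatted_segs.length
  let last_nonzero : Int := lastNZfold n is_zero_segment is_zero_segment.length
  (PySem.List.enumerate formatted_segs 0).map
    (fun p =>
      if 0 < p.1 ∧ p.1 < n - 1 ∧ p.1 < (is_zero_segment.length : Int) ∧
         PySem.List.pyGetD is_zero_segment p.1 false = true ∧ last_nonzero < p.1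
      then "" else p.2)

-- ===== PRECONDITION & SPEC =====
def Spec_clear_zero_segments_py (formatted_segs : List String) (is_zero_segment : List Bool) (out : List String) : Prop := out = clear_zero_segments_py_alt formatted_segs is_zero_segment
instance (formatted_segs : List String) (is_zero_segment : List Bool) (out : List String) : Decidable (Spec_clear_zero_segments_py formatted_segs is_zero_segment out) := by unfold Spec_clear_zero_segments_py; infer_instance

-- ===== CLAIM (what is proved, stated in full; the proofs are below) =====
def Claim_equal_clear_zero_segments_py : Prop := ∀ (formatted_segs : List String) (is_zero_segment : List Bool), Dom_clear_zero_segments_py formatted_segs is_zero_segment → Spec_clear_zero_segments_py formatted_segs is_zero_segment (clear_zero_segments_py formatted_segs is_zero_segment)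

-- ===== LEMMAS AND PROOFS =====

-- "index i gets cleared by A's loop over the suffix l = izs.drop s": i is optional, its flag
-- entry is True, and every optional index to its right in l has a True flag entry.
def condA (nfs : Nat) (l : List Bool) (s i : Nat) : Bool :=
  decide (s ≤ i ∧ i - s < l.length ∧ 0 < i ∧ i + 1 < nfs ∧ l.getD (i - s) false = true ∧
  ∀ j, j < l.length → i - s < j → 0 < s + j → s + j + 1 < nfs → l.getD j false = true)

theorem condA_cons_of_ne (nfs : Nat) (b : Bool) (rest : List Bool) (s i : Nat) (h : i ≠ s) :
    condA nfs (b :: rest) s i = condA nfs rest (s+1) i := by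
  unfold condA
  simp only [decide_eq_decide, List.length_cons]
  constructor
  · rintro ⟨h1, h2, h3, h4, h5, h6⟩
    have hsi : s + 1 ≤ i := by omega
    refine ⟨hsi, by omega, h3, h4, ?_, ?_⟩
    · have : i - s = (i - (s+1)) + 1 := by omega
      rw [this] at h5; simpa using h5
    · intro j hj hij h0 hn
      have := h6 (j+1) (by omega) (by omega) (by omega) (by omega)
      simpa using this
  · rintro ⟨h1, h2, h3, h4, h5, h6⟩
    refine ⟨by omega, by omega, h3, h4, ?_, ?_⟩
    · have : i - s = (i - (s+1)) + 1 := by omega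
      rw [this]; simpa using h5
    · intro j hj hij h0 hn
      have hj1 : 1 ≤ j := by omega
      obtain ⟨j', rfl⟩ : ∃ j', j = j' + 1 := ⟨j - 1, by omega⟩
      have := h6 j' (by omega) (by omega) (by omega) (by omega)
      simpa using this

theorem condA_cons_self (nfs : Nat) (b : Bool) (rest : List Bool) (s : Nat) :
    condA nfs (b :: rest) s s =
      decide ((0 < s ∧ s + 1 < nfs) ∧ b = true ∧
        ¬∃ j, j < rest.length ∧ 0 < (s+1) + j ∧ (s+1) + j + 1 < nfs ∧ rest.getD j false = false) := by
  unfold condA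
  simp only [decide_eq_decide, List.length_cons, Nat.sub_self, List.getD_cons_zero]
  constructor
  · rintro ⟨-, -, h3, h4, h5, h6⟩
    refine ⟨⟨h3, h4⟩, h5, ?_⟩
    rintro ⟨j, hj, h0, hn, hz⟩
    have := h6 (j+1) (by omega) (by omega) (by omega) (by omega)
    simp only [List.getD_cons_succ] at this
    rw [this] at hz; exact absurd hz (by decide)
  · rintro ⟨⟨h3, h4⟩, h5, h6⟩
    refine ⟨le_refl s, by omega, h3, h4, h5, ?_⟩
    intro j hj hij h0 hn
    obtain ⟨j', rfl⟩ : ∃ j', j = j' + 1 := ⟨j - 1, by omega⟩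
    simp only [List.getD_cons_succ]
    by_contra hb
    exact h6 ⟨j', by omega, by omega, by omega, by simpa using Bool.eq_false_iff.mpr hb⟩

theorem loopA_char (nfs : Nat) (l : List Bool) : ∀ (s : Nat) (cur : List String),
    cur.length = nfs →
    (((PySem.List.enumerate l (s : Int)).foldr (fun p st => stepA nfs st p) (false, cur)).1
      = decide (∃ j, j < l.length ∧ 0 < s + j ∧ s + j + 1 < nfs ∧ l.getD j false = false))
    ∧ (((PySem.List.enumerate l (s : Int)).foldr (fun p st => stepA nfs st p) (false, cur)).2.length
      = cur.length)
    ∧ ∀ i, i < cur.length →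
      (((PySem.List.enumerate l (s : Int)).foldr (fun p st => stepA nfs st p) (false, cur)).2.getD i ""
        = if condA nfs l s i = true then "" else cur.getD i "") := by
  induction l with
  | nil =>
    intro s cur hc
    simp only [PySem.List.enumerate_nil, List.foldr_nil]
    refine ⟨?_, ?_, ?_⟩
    · simp
    · trivial
    intro i hi
    have : condA nfs [] s i = false := by
      unfold condA; simp
    rw [this]; simp
  | cons b rest ih =>
    intro s cur hc
    rw [PySem.List.enumerate_cons, show (s:Int) + 1 = ((s+1 : Nat) : Int) by push_cast; ring]
    simp only [List.foldr_cons]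
    obtain ⟨ihf, ihl, ihe⟩ := ih (s+1) cur hc
    set r := (PySem.List.enumerate rest ((s+1:Nat) : Int)).foldr (fun p st => stepA nfs st p) (false, cur) with hr
    unfold stepA
    by_cases hopt : 0 < (s:Int) ∧ (s:Int) < (nfs:Int) - 1
    · rw [if_pos hopt]
      have hsnat : 0 < s ∧ s + 1 < nfs := by omega
      by_cases hbz : b = true ∧ r.1 = false
      · rw [if_pos hbz]
        have hflag : ¬∃ j, j < rest.length ∧ 0 < (s+1) + j ∧ (s+1) + j + 1 < nfs ∧ rest.getD j false = false := by
          have := hbz.2; rw [ihf] at this; simpa using this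
        refine ⟨?_, ?_, ?_⟩
        · rw [hbz.2, eq_comm]
          simp only [decide_eq_false_iff_not]
          rintro ⟨j, hj, h0, hn, hz⟩
          rcases j with _ | j'
          · simp only [List.getD_cons_zero] at hz; rw [hbz.1] at hz; exact absurd hz (by decide)
          · exact hflag ⟨j', by simp only [List.length_cons] at hj; omega, by omega, by omega, by simpa using hz⟩
        · simp only [PySem.List.pySetD_natCast, List.length_set]; exact ihl
        · intro i hi
          rw [PySem.List.pySetD_natCast]
          by_cases his : i = s
          · subst his
            have hsl : i < r.2.length := by rw [ihl]; omega
            rw [List.getD_eq_getElem?_getD, List.getElem?_set_self hsl]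
            have : condA nfs (b :: rest) i i = true := by
              rw [condA_cons_self]
              simp only [decide_eq_true_eq]
              exact ⟨hsnat, hbz.1, hflag⟩
            rw [this]; simp
          · rw [List.getD_eq_getElem?_getD, List.getElem?_set_ne (by omega : s ≠ i),
                ← List.getD_eq_getElem?_getD, ihe i hi, condA_cons_of_ne nfs b rest s i his]
      · rw [if_neg hbz]
        have hcases : b = false ∨ r.1 = true := by
          rcases Bool.eq_false_or_eq_true b with hb | hb
          · rcases Bool.eq_false_or_eq_true r.1 with h1 | h1
            · exact Or.inr h1
            · exact absurd ⟨hb, h1⟩ hbz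
          · exact Or.inl hb
        refine ⟨?_, ihl, ?_⟩
        · rw [eq_comm]
          simp only [decide_eq_true_eq]
          rcases hcases with hb | h1
          · exact ⟨0, by simp only [List.length_cons]; omega, by omega, by omega, by simp [hb]⟩
          · rw [ihf] at h1
            simp only [decide_eq_true_eq] at h1
            obtain ⟨j, hj, h0, hn, hz⟩ := h1
            exact ⟨j+1, by simp only [List.length_cons]; omega, by omega, by omega, by simpa using hz⟩
        · intro i hi
          rw [ihe i hi]
          by_cases his : i = s
          · subst his
            have h1 : condA nfs rest (i+1) i = false := by
              unfold condA
              simp only [decide_eq_false_iff_not]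
              rintro ⟨h1, -⟩; omega
            have h2 : condA nfs (b :: rest) i i = false := by
              rw [condA_cons_self]
              simp only [decide_eq_false_iff_not]
              rintro ⟨-, hb, hnf⟩
              have : r.1 = false := by
                rw [ihf]
                simp only [decide_eq_false_iff_not]
                simpa using hnf
              exact hbz ⟨hb, this⟩
            rw [h1, h2]
          · rw [condA_cons_of_ne nfs b rest s i his]
    · rw [if_neg hopt]
      refine ⟨?_, ihl, ?_⟩
      · rw [ihf]
        simp only [decide_eq_decide]
        constructor
        · rintro ⟨j, hj, h0, hn, hz⟩
          exact ⟨j+1, by simp only [List.length_cons]; omega, by omega, by omega, by simpa using hz⟩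
        · rintro ⟨j, hj, h0, hn, hz⟩
          rcases j with _ | j'
          · exact absurd (by omega : 0 < (s:Int) ∧ (s:Int) < (nfs:Int) - 1) hopt
          · exact ⟨j', by simp only [List.length_cons] at hj; omega, by omega, by omega, by simpa using hz⟩
      · intro i hi
        rw [ihe i hi]
        by_cases his : i = s
        · subst his
          have h1 : condA nfs rest (i+1) i = false := by
            unfold condA
            simp only [decide_eq_false_iff_not]
            rintro ⟨h1, -⟩; omega
          have h2 : condA nfs (b :: rest) i i = false := by
            rw [condA_cons_self]
            simp only [decide_eq_false_iff_not]
            rintro ⟨ho, -⟩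
            exact hopt (by omega)
          rw [h1, h2]
        · rw [condA_cons_of_ne nfs b rest s i his]

theorem lastNZ_lt (n : Int) (izs : List Bool) : ∀ (m : Nat) (i : Int), -1 < i →
    (lastNZfold n izs m < i ↔
      ∀ j : Nat, j < m → i ≤ (j : Int) →
        ¬(0 < (j : Int) ∧ (j : Int) < n - 1 ∧ PySem.List.pyGetD izs (j : Int) false = false)) := by
  intro m
  induction m with
  | zero =>
    intro i hi
    unfold lastNZfold
    rw [show ((0:Nat):Int) = 0 by simp, PySem.List.pyRange_one_eq_nil (by omega)]
    simp only [List.foldl_nil]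
    constructor
    · intro _ j hj; omega
    · intro _; omega
  | succ m ih =>
    intro i hi
    unfold lastNZfold at ih ⊢
    rw [show ((m+1:Nat):Int) = (m:Int)+1 by push_cast; ring,
        PySem.List.pyRange_one_succ_right (by omega), List.foldl_append]
    simp only [List.foldl_cons, List.foldl_nil]
    by_cases hm : 0 < (m:Int) ∧ (m:Int) < n - 1 ∧ PySem.List.pyGetD izs (m:Int) false = false
    · rw [if_pos hm]
      constructor
      · intro hmi j hj hij _
        omega
      · intro h
        by_contra hni
        exact h m (by omega) (by omega) hm
    · rw [if_neg hm]
      rw [ih i hi]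
      constructor
      · intro h j hj hij
        rcases Nat.lt_or_ge j m with hjm | hjm
        · exact h j hjm hij
        · have : j = m := by omega
          subst this; exact hm
      · intro h j hj hij
        exact h j (by omega) hij

theorem ab_agree (fs : List String) (izs : List Bool) :
    clear_zero_segments_py fs izs = clear_zero_segments_py_alt fs izs := by
  unfold clear_zero_segments_py clear_zero_segments_py_alt
  dsimp only
  rw [List.foldl_reverse]
  obtain ⟨-, hlen, helem⟩ := loopA_char fs.length izs 0 fs rfl
  simp only [Nat.cast_zero] at hlen helem
  apply List.ext_getElem
  · rw [hlen]
    simp [PySem.List.length_enumerate]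
  · intro i h1 h2
    have hif : i < fs.length := by
      simpa [PySem.List.length_enumerate] using h2
    have hA := helem i hif
    rw [List.getD_eq_getElem?_getD, List.getElem?_eq_getElem h1, Option.getD_some] at hA
    rw [hA, List.getElem_map, PySem.List.getElem_enumerate]
    simp only [zero_add]
    have hiff : (0 < (i:Int) ∧ (i:Int) < (fs.length:Int) - 1 ∧ (i:Int) < (izs.length:Int) ∧
        PySem.List.pyGetD izs (i:Int) false = true ∧
        lastNZfold (fs.length:Int) izs izs.length < (i:Int)) ↔ condA fs.length izs 0 i = true := by
      constructor
      · rintro ⟨hb0, hbn, hblen, hbz, hblast⟩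
        have hi0 : 0 < i := by exact_mod_cast hb0
        have hin : i + 1 < fs.length := by omega
        have hilen : i < izs.length := by exact_mod_cast hblen
        simp only [PySem.List.pyGetD_natCast] at hbz
        rw [lastNZ_lt _ izs izs.length (i:Int) (by omega)] at hblast
        unfold condA
        simp only [decide_eq_true_eq, Nat.sub_zero]
        refine ⟨by omega, hilen, hi0, hin, hbz, ?_⟩
        intro j hj hij hj0 hjn
        by_contra hjz
        refine hblast j hj (by omega) ⟨by omega, by omega, ?_⟩
        simp only [PySem.List.pyGetD_natCast]
        exact Bool.eq_false_iff.mpr hjz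
      · intro hcond
        unfold condA at hcond
        simp only [decide_eq_true_eq, Nat.sub_zero] at hcond
        obtain ⟨-, hilen, hi0, hin, hiz, hall⟩ := hcond
        refine ⟨by exact_mod_cast hi0, by omega, by exact_mod_cast hilen,
          by simpa [PySem.List.pyGetD_natCast] using hiz, ?_⟩
        rw [lastNZ_lt _ izs izs.length (i:Int) (by omega)]
        intro j hj hij
        rintro ⟨hj0, hjn, hjz⟩
        simp only [PySem.List.pyGetD_natCast] at hjz
        rcases Nat.lt_or_ge i j with hlt | hge
        · have := hall j hj (by omega) (by omega) (by omega)
          rw [this] at hjz; exact absurd hjz (by decide)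
        · have hji : j = i := by omega
          subst hji
          rw [hiz] at hjz; exact absurd hjz (by decide)
    simp only [hiff]
    by_cases h : condA fs.length izs 0 i = true
    · simp [h]
    · simp [h, List.getD_eq_getElem?_getD, List.getElem?_eq_getElem hif]

-- ===== VERDICT (by name: the statement is the Claim_ definition above) =====
theorem clear_zero_segments_py_spec : Claim_equal_clear_zero_segments_py := by
  intro formatted_segs is_zero_segment _
  unfold Spec_clear_zero_segments_py
  exact ab_agree formatted_segs is_zero_segment
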